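-- pv_equiv track=rewrite | github.com/jacksparke254/financial-markets-ml | INDICATOR FUNCTIONS.py | adjust_class_labels
-- ===== SOURCE A (Python) =====
-- def adjust_class_labels(class_labels, num_missing_classes):
--     missing_classes = [cls for cls in range(num_missing_classes) if cls not in class_labels]
--
--     adjusted_labels = class_labels.copy()
--     for i in range(len(adjusted_labels)):
--         for missing_cls in missing_classes:
--             if adjusted_labels[i] > missing_cls:
--                 adjusted_labels[i] -= 1
--
--     # After the second missing class, decrement by 2
--     second_missing_cls = max(missing_classes)
--     for i in range(len(adjusted_labels)):
--         if adjusted_labels[i] > second_missing_cls: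
--             adjusted_labels[i] -= 2
--
--     return adjusted_labels
-- ===== SOURCE B (Python) =====
-- def adjust_class_labels(class_labels, num_missing_classes):
--     present = set(class_labels)
--     missing = [c for c in range(num_missing_classes) if c not in present]
--     thresholds = [m + k for k, m in enumerate(missing)]
--     top = missing[-1]  # no missing class: IndexError here (A raises ValueError); excluded by Pre_
--     result = []
--     for v in class_labels:
--         w = v - _bisect_left(thresholds, v)
--         result.append(w - 2 if w > top else w)
--     return result
--
-- def _bisect_left(t, v):
--     lo, hi = 0, len(t)
--     while lo < hi:
--         mid = (lo + hi) // 2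
--         if t[mid] < v:
--             lo = mid + 1
--         else:
--             hi = mid
--     return lo
-- ===== Notes on version B (the rewrite author's own statement) =====
-- stated objective: faster
-- what changed: Replaces the per-label scan over all missing classes (and the O(L) list membership per range element) by a set for membership plus a precomputed strictly increasing threshold array m_k+k, so each label's total decrement is one binary search; the final -2 step is folded into the same pass.
import Mathlib
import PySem

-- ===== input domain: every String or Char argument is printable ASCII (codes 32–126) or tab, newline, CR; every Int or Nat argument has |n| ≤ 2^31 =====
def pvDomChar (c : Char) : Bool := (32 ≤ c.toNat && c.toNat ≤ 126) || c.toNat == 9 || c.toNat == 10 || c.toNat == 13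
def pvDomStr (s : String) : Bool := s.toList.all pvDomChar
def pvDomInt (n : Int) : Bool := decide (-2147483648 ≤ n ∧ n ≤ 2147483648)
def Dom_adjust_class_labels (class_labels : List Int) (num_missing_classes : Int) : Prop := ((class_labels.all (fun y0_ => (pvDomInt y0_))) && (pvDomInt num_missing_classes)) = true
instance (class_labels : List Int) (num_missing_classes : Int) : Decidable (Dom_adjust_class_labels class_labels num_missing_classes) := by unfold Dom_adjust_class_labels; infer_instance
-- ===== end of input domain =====

-- B replaces the per-label scan over all missing classes (and O(L) list membership) by a set
-- for membership and a binary search over the precomputed thresholds m_k+k (objective: faster).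


-- ===== PORT A =====
def adjust_class_labels (class_labels : List Int) (num_missing_classes : Int) : List Int :=
  let missing_classes := (PySem.List.pyRange 0 num_missing_classes 1).filter
    (fun cls => !decide (cls ∈ class_labels))
  -- the i-loop updates each position independently: elementwise inner loop over missing_classes
  let adjusted_labels := class_labels.map (fun v =>
    missing_classes.foldl (fun w missing_cls => if w > missing_cls then w - 1 else w) v)
  match PySem.List.max? missing_classes (fun x => x) with
  | none => adjusted_labels  -- Python: max([]) raises ValueError; excluded by Pre_
  | some second_missing_cls =>
      adjusted_labels.map (fun w => if w > second_missing_cls then w - 2 else w)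

-- ===== PORT B =====
-- _bisect_left from Source B; t[mid] is always in range when reached (0 ≤ lo ≤ mid < hi ≤ len t)
def pvBisectGo (t : List Int) (v : Int) (lo hi : Nat) : Nat :=
  if _h : lo < hi then
    if t.getD ((lo + hi) / 2) 0 < v then pvBisectGo t v ((lo + hi) / 2 + 1) hi
    else pvBisectGo t v lo ((lo + hi) / 2)
  else lo
termination_by hi - lo
decreasing_by all_goals omega

def pvBisectLeft (t : List Int) (v : Int) : Nat := pvBisectGo t v 0 t.length

def adjust_class_labels_alt (class_labels : List Int) (num_missing_classes : Int) : List Int :=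
  let present := PySem.Set.ofList class_labels
  let missing := (PySem.List.pyRange 0 num_missing_classes 1).filter
    (fun c => !(PySem.Set.contains present c))
  -- enumerate: zipIdx carries the same (value, index) data; m + k elementwise
  let thresholds := missing.zipIdx.map (fun p => p.1 + (p.2 : Int))
  match PySem.List.pyGet? missing (-1) with
  | none => []  -- Python: missing[-1] raises IndexError; excluded by Pre_
  | some top => class_labels.map (fun v =>
      let w := v - (pvBisectLeft thresholds v : Int)
      if w > top then w - 2 else w)

-- ===== PRECONDITION & SPEC =====
-- Pre_ excludes exactly the inputs with no missing class in range(num_missing_classes), where A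
-- raises ValueError (max of empty list); the range is capped at length+1 (pigeonhole: a range longer
-- than the label list always has a missing class), which keeps the condition evaluable for huge n.
def Pre_adjust_class_labels (class_labels : List Int) (num_missing_classes : Int) : Prop :=
  ∃ c ∈ PySem.List.pyRange 0 (min num_missing_classes ((class_labels.length : Int) + 1)) 1,
    c ∉ class_labels
instance (class_labels : List Int) (num_missing_classes : Int) : Decidable (Pre_adjust_class_labels class_labels num_missing_classes) := by unfold Pre_adjust_class_labels; infer_instance

def pvWitness_adjust_class_labels : List Int × Int := ([2, 3, 0, 5], 3)

def Spec_adjust_class_labels (class_labels : List Int) (num_missing_classes : Int) (out : List Int) : Prop := out = adjust_class_labels_alt class_labels num_missing_classes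
instance (class_labels : List Int) (num_missing_classes : Int) (out : List Int) : Decidable (Spec_adjust_class_labels class_labels num_missing_classes out) := by unfold Spec_adjust_class_labels; infer_instance

-- ===== CLAIM (what is proved, stated in full; the proofs are below) =====
def Claim_equal_adjust_class_labels : Prop := ∀ (class_labels : List Int) (num_missing_classes : Int), Dom_adjust_class_labels class_labels num_missing_classes → Pre_adjust_class_labels class_labels num_missing_classes → Spec_adjust_class_labels class_labels num_missing_classes (adjust_class_labels class_labels num_missing_classes)

-- ===== LEMMAS AND PROOFS =====

-- thresholds list: tlist [m0,m1,...] = [m0, m1+1, m2+2, ...]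
def pvTList : List Int → List Int
  | [] => []
  | m :: r => m :: (pvTList r).map (· + 1)

theorem pvTList_ge (r : List Int) (x : Int) (hx : x ∈ pvTList r) : ∃ y ∈ r, y ≤ x := by
  induction r generalizing x with
  | nil => simp [pvTList] at hx
  | cons a r ih =>
      simp only [pvTList, List.mem_cons, List.mem_map] at hx
      rcases hx with h | ⟨z, hz, rfl⟩
      · exact ⟨a, List.mem_cons_self, le_of_eq h.symm⟩
      · obtain ⟨y, hy, hyz⟩ := ih z hz
        exact ⟨y, List.mem_cons_of_mem _ hy, by omega⟩

theorem pvTList_pairwise (ms : List Int) (h : ms.Pairwise (· < ·)) :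
    (pvTList ms).Pairwise (· < ·) := by
  induction ms with
  | nil => simp [pvTList]
  | cons a r ih =>
      rcases List.pairwise_cons.mp h with ⟨ha, hr⟩
      refine List.pairwise_cons.mpr ⟨?_, ?_⟩
      · intro x hx
        simp only [List.mem_map] at hx
        obtain ⟨z, hz, rfl⟩ := hx
        obtain ⟨y, hy, hyz⟩ := pvTList_ge r z hz
        have := ha y hy; omega
      · exact List.Pairwise.map _ (fun {x y} h => by omega) (ih hr)

theorem pvFoldl_eq_sub_count (ms : List Int) (h : ms.Pairwise (· < ·)) (v : Int) :
    ms.foldl (fun w m => if w > m then w - 1 else w) v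
      = v - ((pvTList ms).countP (fun x => decide (x < v)) : Int) := by
  induction ms generalizing v with
  | nil => simp [pvTList]
  | cons a r ih =>
      rcases List.pairwise_cons.mp h with ⟨ha, hr⟩
      simp only [List.foldl_cons, pvTList, List.countP_cons]
      by_cases hv : v > a
      · rw [if_pos hv, ih hr (v - 1)]
        have hcc : ((pvTList r).map (· + 1)).countP (fun x => decide (x < v))
            = (pvTList r).countP (fun x => decide (x < v - 1)) := by
          rw [List.countP_map]
          refine List.countP_congr fun x _ => ?_
          simp only [Function.comp_apply, decide_eq_true_eq]
          omega
        rw [hcc]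
        have hav : decide (a < v) = true := decide_eq_true hv
        rw [hav]; simp only [if_pos]; push_cast; omega
      · rw [if_neg hv, ih hr v]
        have h1 : ((pvTList r).map (· + 1)).countP (fun x => decide (x < v)) = 0 := by
          rw [List.countP_eq_zero]
          intro x hx
          simp only [List.mem_map] at hx
          obtain ⟨z, hz, rfl⟩ := hx
          obtain ⟨y, hy, hyz⟩ := pvTList_ge r z hz
          have := ha y hy
          simp; omega
        have h2 : (pvTList r).countP (fun x => decide (x < v)) = 0 := by
          rw [List.countP_eq_zero]
          intro x hx
          obtain ⟨y, hy, hyz⟩ := pvTList_ge r x hx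
          have := ha y hy
          simp; omega
        have hav : decide (a < v) = false := by simpa using hv
        rw [hav, h1, h2]; simp

theorem pvEnum_map (ms : List Int) (s : Nat) :
    (ms.zipIdx s).map (fun p => p.1 + (p.2 : Int)) = (pvTList ms).map (· + (s : Int)) := by
  induction ms generalizing s with
  | nil => simp [pvTList]
  | cons a r ih =>
      simp only [List.zipIdx_cons, List.map_cons, pvTList, ih, List.map_map]
      refine congrArg₂ _ rfl (List.map_congr_left fun x _ => ?_)
      simp [Function.comp]; ring

theorem pvCount_char (v : Int) (t : List Int) : ∀ (lo : Nat), lo ≤ t.length →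
    (∀ i (h : i < t.length), (t[i] < v ↔ i < lo)) →
    t.countP (fun x => decide (x < v)) = lo := by
  induction t with
  | nil => intro lo h _; simp at h; simp [h]
  | cons a r ih =>
      intro lo hlo hiff
      rcases lo with _ | l
      · have h0 : ¬ a < v := by
          intro hav; exact absurd ((hiff 0 (by simp)).mp hav) (by omega)
        rw [List.countP_cons]
        have hd : decide (a < v) = false := by simpa using h0
        rw [hd, ih 0 (by omega) (fun i h => by
          have := hiff (i+1) (by simpa using Nat.succ_lt_succ h)
          simpa using this)]
        simp
      · have h0 : a < v := (hiff 0 (by simp)).mpr (Nat.succ_pos l)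
        rw [List.countP_cons]
        have hd : decide (a < v) = true := by simpa using h0
        rw [hd, ih l (by simpa using hlo) (fun i h => by
          have := hiff (i+1) (by simpa using Nat.succ_lt_succ h)
          simpa [Nat.succ_lt_succ_iff] using this)]
        simp

theorem pvBisectGo_eq (t : List Int) (v : Int) (hs : t.Pairwise (· < ·))
    (lo hi : Nat) (h1 : lo ≤ hi) (h2 : hi ≤ t.length)
    (hpre : ∀ i (h : i < t.length), i < lo → t[i] < v)
    (hpost : ∀ i (h : i < t.length), hi ≤ i → ¬ t[i] < v) :
    pvBisectGo t v lo hi = t.countP (fun x => decide (x < v)) := by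
  rw [pvBisectGo]
  by_cases hlh : lo < hi
  · rw [dif_pos hlh]
    have hmid1 : lo ≤ (lo + hi) / 2 := by omega
    have hmid2 : (lo + hi) / 2 < hi := by omega
    have hmlt : (lo + hi) / 2 < t.length := by omega
    have hget : t.getD ((lo + hi) / 2) 0 = t[(lo + hi) / 2] := List.getD_eq_getElem t 0 hmlt
    have hmono := List.pairwise_iff_getElem.mp hs
    by_cases hc : t.getD ((lo + hi) / 2) 0 < v
    · rw [if_pos hc]
      exact pvBisectGo_eq t v hs ((lo + hi) / 2 + 1) hi (by omega) h2
        (fun i h hi' => by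
          rcases Nat.lt_or_ge i lo with h' | h'
          · exact hpre i h h'
          · rcases Nat.lt_or_ge i ((lo + hi) / 2) with h'' | h''
            · calc t[i] < t[(lo + hi) / 2] := hmono i _ h hmlt h''
                _ < v := hget ▸ hc
            · have : i = (lo + hi) / 2 := by omega
              subst this; exact hget ▸ hc)
        hpost
    · rw [if_neg hc]
      exact pvBisectGo_eq t v hs lo ((lo + hi) / 2) (by omega) (by omega) hpre
        (fun i h hi' => by
          rcases Nat.lt_or_ge ((lo + hi) / 2) i with h' | h'
          · have : t[(lo + hi) / 2] < t[i] := hmono _ i hmlt h h'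
            rw [hget] at hc; omega
          · have : i = (lo + hi) / 2 := by omega
            subst this; rw [hget] at hc; omega)
  · rw [dif_neg hlh]
    have hlohi : lo = hi := by omega
    subst hlohi
    exact (pvCount_char v t lo h2 (fun i h => ⟨fun hlt => by
      by_contra hge
      exact hpost i h (by omega) hlt, hpre i h⟩)).symm
termination_by hi - lo
decreasing_by all_goals omega

theorem pvBisectLeft_eq (t : List Int) (v : Int) (hs : t.Pairwise (· < ·)) :
    pvBisectLeft t v = t.countP (fun x => decide (x < v)) :=
  pvBisectGo_eq t v hs 0 t.length (Nat.zero_le _) le_rfl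
    (fun i _ h => absurd h (Nat.not_lt_zero i)) (fun i h hi => absurd h (by omega))

theorem pvLast_isMax (ms : List Int) (h : ms.Pairwise (· < ·)) (hne : ms ≠ []) :
    ∀ x ∈ ms, x ≤ ms.getLast hne := by
  intro x hx
  obtain ⟨i, hi, rfl⟩ := List.mem_iff_getElem.mp hx
  rw [List.getLast_eq_getElem]
  rcases Nat.lt_or_ge i (ms.length - 1) with h' | h'
  · exact le_of_lt (List.pairwise_iff_getElem.mp h i _ hi (by omega) h')
  · have hieq : i = ms.length - 1 := by omega
    subst hieq; exact le_rfl

theorem pvMax_eq_getLast? (ms : List Int) (h : ms.Pairwise (· < ·)) (hne : ms ≠ []) :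
    PySem.List.max? ms (fun x => x) = ms.getLast? := by
  obtain ⟨m, hm⟩ : ∃ m, PySem.List.max? ms (fun x => x) = some m := by
    cases hmx : PySem.List.max? ms (fun x => x) with
    | none => exact absurd ((PySem.List.max?_eq_none_iff ms (fun x => x)).mp hmx) hne
    | some m => exact ⟨m, rfl⟩
  rw [hm, List.getLast?_eq_some_getLast hne]
  have hmem := PySem.List.max?_mem hm
  have hmax := PySem.List.max?_isMax hm
  have h1 : m ≤ ms.getLast hne := pvLast_isMax ms h hne m hmem
  have h2 : ms.getLast hne ≤ m := hmax _ (List.getLast_mem hne)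
  exact congrArg some (by omega)

-- ===== VERDICT (by name: the statement is the Claim_ definition above) =====
theorem adjust_class_labels_spec : Claim_equal_adjust_class_labels := by
  intro labels n _ hpre
  unfold Spec_adjust_class_labels adjust_class_labels adjust_class_labels_alt
  dsimp only
  have hfilt : (PySem.List.pyRange 0 n 1).filter
        (fun c => !(PySem.Set.contains (PySem.Set.ofList labels) c))
      = (PySem.List.pyRange 0 n 1).filter (fun cls => !decide (cls ∈ labels)) := by
    refine List.filter_congr fun c _ => ?_
    by_cases hc : c ∈ labels
    · simp [hc, PySem.Set.mem_ofList]
    · simp [hc, PySem.Set.mem_ofList]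
  rw [hfilt]
  set missing := (PySem.List.pyRange 0 n 1).filter (fun cls => !decide (cls ∈ labels)) with hmiss
  have hpw : missing.Pairwise (· < ·) :=
    (PySem.List.pairwise_lt_pyRange_one 0 n).filter _
  have hne : missing ≠ [] := by
    obtain ⟨c, hc1, hc2⟩ := hpre
    have hc1' : c ∈ PySem.List.pyRange 0 n 1 := by
      rw [PySem.List.mem_pyRange_one] at hc1 ⊢
      omega
    have : c ∈ missing := List.mem_filter.mpr ⟨hc1', by simpa using hc2⟩
    exact List.ne_nil_of_mem this
  rw [pvMax_eq_getLast? missing hpw hne, PySem.List.pyGet?_neg_one,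
    List.getLast?_eq_some_getLast hne]
  simp only [List.map_map]
  refine List.map_congr_left fun v _ => ?_
  have ht : missing.zipIdx.map (fun p => p.1 + (p.2 : Int)) = pvTList missing := by
    rw [pvEnum_map]; simp
  rw [ht, pvBisectLeft_eq _ v (pvTList_pairwise missing hpw),
    Function.comp_apply, pvFoldl_eq_sub_count missing hpw v]
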